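-- pv_equiv track=rewrite | github.com/ErnieWhite/AoC | 2015/Day_05/main.py | _solver_2
-- ===== SOURCE A (Python) =====
-- from itertools import pairwise
--
-- def _solver_2(s):
--     """
--     It contains a pair of any two letters that appears at least twice in
--     the string without overlapping, like xyxy (xy) or aabcdefgaa (aa), but
--     not like aaa (aa, but it overlaps).
--     """
--     i_1 = 0
--     i_2 = 2
--     result = False
--     for i_1 in range(len(s) - 3):
--         search_for = s[i_1:i_1+2]
--         search_in = [''.join(x) for x in pairwise(s[i_1+2:])]
--         if search_for in search_in:
--             result = True
--             break
--
--     if not result: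
--         return result
--
--     """
--     It contains at least one letter which repeats with exactly one letter
--     between them, like xyx, abcdefeghi (efe), or even aaa.
--     """
--     for i in range(len(s)-2):
--         if s[i] == s[i+2]:
--             return True
--     return False
-- ===== SOURCE B (Python) =====
-- def _solver_2(s):
--     n = len(s)
--     # rule 1: some pair of adjacent chars occurs again, non-overlapping,
--     # found in one pass with a set of pairs seen at least two positions back
--     seen = set()
--     rule1 = False
--     for j in range(2, n - 1):
--         seen.add(s[j-2:j])
--         if s[j:j+2] in seen:
--             rule1 = True
--             break
--     if not rule1:
--         return False
--     # rule 2: some letter repeats with exactly one letter between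
--     return any(s[i] == s[i+2] for i in range(n - 2))
-- ===== Notes on version B (the rewrite author's own statement) =====
-- stated objective: faster
-- what changed: A rescans all later pairs for every position (quadratic); B makes one pass keeping a set of pairs seen at least two positions back, so the inner scan disappears.
import Mathlib
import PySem

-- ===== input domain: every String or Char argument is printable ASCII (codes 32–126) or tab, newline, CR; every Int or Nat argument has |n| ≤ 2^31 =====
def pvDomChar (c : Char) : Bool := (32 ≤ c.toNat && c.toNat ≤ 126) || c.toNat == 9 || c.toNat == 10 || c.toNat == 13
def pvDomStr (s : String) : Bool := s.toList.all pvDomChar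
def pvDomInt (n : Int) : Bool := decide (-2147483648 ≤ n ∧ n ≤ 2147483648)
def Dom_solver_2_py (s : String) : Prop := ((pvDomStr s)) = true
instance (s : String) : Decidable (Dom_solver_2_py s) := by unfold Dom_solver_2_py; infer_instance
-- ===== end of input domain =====

-- B replaces A's quadratic rescan of all later pairs by one linear pass keeping a set of pairs seen two positions back.

-- ===== PORT A =====
-- for i_1 in range(len(s)-3): search_for = s[i_1:i_1+2]; search_in = pairwise(s[i_1+2:]); break on hit
def pvLoopA1 (l : List Char) : List Int → Bool
  | [] => false
  | i :: rest =>
    let searchFor := PySem.List.slice l (some i) (some (i + 2))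
    let t := PySem.List.slice l (some (i + 2)) none
    let searchIn := (t.zip t.tail).map (fun p => [p.1, p.2])   -- ''.join over a char pair = the 2-char string, kept as List Char
    if searchIn.contains searchFor then true else pvLoopA1 l rest

-- for i in range(len(s)-2): if s[i] == s[i+2]: return True
def pvLoopA2 (l : List Char) : List Int → Bool
  | [] => false
  | i :: rest =>
    if PySem.List.pyGet? l i == PySem.List.pyGet? l (i + 2) then true else pvLoopA2 l rest

def solver_2_py (s : String) : Bool :=
  let l := s.toList
  let result := pvLoopA1 l (PySem.List.pyRange 0 ((l.length : Int) - 3) 1)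
  if !result then result
  else pvLoopA2 l (PySem.List.pyRange 0 ((l.length : Int) - 2) 1)

-- ===== PORT B =====
-- for j in range(2, n-1): seen.add(s[j-2:j]); if s[j:j+2] in seen: rule1 = True; break
def pvLoopB1 (l : List Char) (seen : PySem.Set (List Char)) : List Int → Bool
  | [] => false
  | j :: rest =>
    let seen' := seen.add (PySem.List.slice l (some (j - 2)) (some j))
    if seen'.contains (PySem.List.slice l (some j) (some (j + 2))) then true
    else pvLoopB1 l seen' rest

def solver_2_py_alt (s : String) : Bool :=
  let l := s.toList
  let n : Int := l.length
  let rule1 := pvLoopB1 l PySem.Set.empty (PySem.List.pyRange 2 (n - 1) 1)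
  if !rule1 then false
  else (PySem.List.pyRange 0 (n - 2) 1).any
    (fun i => PySem.List.pyGet? l i == PySem.List.pyGet? l (i + 2))

-- ===== PRECONDITION & SPEC =====
def Spec_solver_2_py (s : String) (out : Bool) : Prop := out = solver_2_py_alt s
instance (s : String) (out : Bool) : Decidable (Spec_solver_2_py s out) := by unfold Spec_solver_2_py; infer_instance

-- ===== CLAIM (what is proved, stated in full; the proofs are below) =====
def Claim_equal_solver_2_py : Prop := ∀ (s : String), Dom_solver_2_py s → Spec_solver_2_py s (solver_2_py s)

-- ===== LEMMAS AND PROOFS =====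

-- the pair of adjacent characters starting at index i
def pvPair (l : List Char) (i : Nat) : List Char := (l.drop i).take 2

lemma pvMemPairs (t x : List Char) :
    ((t.zip t.tail).map (fun p => [p.1, p.2])).contains x = true ↔
      ∃ k : Nat, k + 2 ≤ t.length ∧ pvPair t k = x := by
  induction t with
  | nil =>
    constructor
    · intro h; simp at h
    · rintro ⟨k, hk, -⟩; simp at hk
  | cons a t ih =>
    cases t with
    | nil =>
      constructor
      · intro h; simp at h
      · rintro ⟨k, hk, -⟩; simp at hk
    | cons b t' =>
      simp only [List.tail_cons, List.zip_cons_cons, List.map_cons, List.contains_cons,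
        Bool.or_eq_true, beq_iff_eq] at *
      constructor
      · rintro (rfl | h)
        · exact ⟨0, by simp, by simp [pvPair]⟩
        · rcases ih.mp h with ⟨k, hk, hp⟩
          refine ⟨k + 1, by simp at hk ⊢; omega, ?_⟩
          simpa [pvPair, List.drop_succ_cons] using hp
      · rintro ⟨k, hk, hp⟩
        cases k with
        | zero => left; simp [pvPair] at hp; exact hp.symm
        | succ k =>
          right
          apply ih.mpr
          refine ⟨k, by simp at hk ⊢; omega, ?_⟩
          simpa [pvPair, List.drop_succ_cons] using hp

lemma pvDropPair (l : List Char) (d k : Nat) : pvPair (l.drop d) k = pvPair l (d + k) := by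
  simp [pvPair, List.drop_drop]

lemma pvLoopA1_iff (l : List Char) (b : Int) :
    ∀ (fuel : Nat) (a : Int), 0 ≤ a → (b - a).toNat = fuel →
      (pvLoopA1 l (PySem.List.pyRange a b 1) = true ↔
        ∃ i : Nat, a ≤ (i : Int) ∧ (i : Int) < b ∧
          ∃ j : Nat, i + 2 ≤ j ∧ j + 2 ≤ l.length ∧ pvPair l i = pvPair l j) := by
  intro fuel
  induction fuel with
  | zero =>
    intro a ha hf
    rw [PySem.List.pyRange_one, hf, List.range_zero, List.map_nil]
    constructor
    · intro h; simp [pvLoopA1] at h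
    · rintro ⟨i, h1, h2, -⟩; omega
  | succ n ihn =>
    intro a ha hf
    obtain ⟨m, rfl⟩ : ∃ m : Nat, a = (m : Int) := ⟨a.toNat, by omega⟩
    have hab : (m : Int) < b := by omega
    rw [PySem.List.pyRange_one_cons hab]
    simp only [pvLoopA1]
    have e3 : (m : Int) + 2 = ((m + 2 : Nat) : Int) := by push_cast; ring
    have h1 : PySem.List.slice l (some (m : Int)) (some ((m : Int) + 2)) = pvPair l m := by
      rw [e3, PySem.List.slice_natCast]
      have : m + 2 - m = 2 := by omega
      rw [this]; rfl
    have h2 : PySem.List.slice l (some ((m : Int) + 2)) none = l.drop (m + 2) := by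
      rw [e3, PySem.List.slice_from_natCast]
    rw [h1, h2]
    split_ifs with hc
    · constructor
      · intro _
        rcases (pvMemPairs _ _).mp hc with ⟨k, hk, hp⟩
        rw [pvDropPair] at hp
        rw [List.length_drop] at hk
        exact ⟨m, by omega, by omega, m + 2 + k, by omega, by omega, hp.symm⟩
      · intro _; rfl
    · rw [ihn ((m : Int) + 1) (by omega) (by omega)]
      constructor
      · rintro ⟨i, hi1, hi2, j, hj1, hj2, hp⟩
        exact ⟨i, by omega, hi2, j, hj1, hj2, hp⟩
      · rintro ⟨i, hi1, hi2, j, hj1, hj2, hp⟩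
        rcases Nat.lt_or_ge m i with him | him
        · exact ⟨i, by omega, hi2, j, hj1, hj2, hp⟩
        · have hieq : i = m := by omega
          exfalso; apply hc
          apply (pvMemPairs _ _).mpr
          refine ⟨j - (m + 2), ?_, ?_⟩
          · rw [List.length_drop]; omega
          · rw [pvDropPair]
            have : m + 2 + (j - (m + 2)) = j := by omega
            rw [this, ← hieq]; exact hp.symm

lemma pvSetAddContains (s : PySem.Set (List Char)) (x y : List Char) :
    (s.add x).contains y = true ↔ (y = x ∨ s.contains y = true) := by
  simp [pysem, or_comm]

lemma pvLoopB1_iff (l : List Char) (b : Int) :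
    ∀ (fuel : Nat) (a : Int) (seen : PySem.Set (List Char)), 2 ≤ a → (b - a).toNat = fuel →
      (∀ x, seen.contains x = true ↔ ∃ i : Nat, (i : Int) + 2 < a ∧ pvPair l i = x) →
      (pvLoopB1 l seen (PySem.List.pyRange a b 1) = true ↔
        ∃ j : Nat, a ≤ (j : Int) ∧ (j : Int) < b ∧
          ∃ i : Nat, i + 2 ≤ j ∧ pvPair l i = pvPair l j) := by
  intro fuel
  induction fuel with
  | zero =>
    intro a seen ha hf hseen
    rw [PySem.List.pyRange_one, hf, List.range_zero, List.map_nil]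
    constructor
    · intro h; simp [pvLoopB1] at h
    · rintro ⟨j, h1, h2, -⟩; omega
  | succ n ihn =>
    intro a seen ha hf hseen
    obtain ⟨m, rfl⟩ : ∃ m : Nat, a = (m : Int) := ⟨a.toNat, by omega⟩
    have hab : (m : Int) < b := by omega
    rw [PySem.List.pyRange_one_cons hab]
    simp only [pvLoopB1]
    have e1 : (m : Int) - 2 = ((m - 2 : Nat) : Int) := by omega
    have e3 : (m : Int) + 2 = ((m + 2 : Nat) : Int) := by push_cast; ring
    have h1 : PySem.List.slice l (some ((m : Int) - 2)) (some (m : Int)) = pvPair l (m - 2) := by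
      rw [e1, PySem.List.slice_natCast]
      have : m - (m - 2) = 2 := by omega
      rw [this]; rfl
    have h2 : PySem.List.slice l (some (m : Int)) (some ((m : Int) + 2)) = pvPair l m := by
      rw [e3, PySem.List.slice_natCast]
      have : m + 2 - m = 2 := by omega
      rw [this]; rfl
    rw [h1, h2]
    have hseen' : ∀ x, (seen.add (pvPair l (m - 2))).contains x = true ↔
        ∃ i : Nat, (i : Int) + 2 < (m : Int) + 1 ∧ pvPair l i = x := by
      intro x
      rw [pvSetAddContains]
      constructor
      · rintro (hx | hx)
        · exact ⟨m - 2, by omega, hx.symm⟩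
        · rcases (hseen x).mp hx with ⟨i, hi, he⟩; exact ⟨i, by omega, he⟩
      · rintro ⟨i, hi, he⟩
        by_cases hia : (i : Int) + 2 < (m : Int)
        · exact Or.inr ((hseen x).mpr ⟨i, hia, he⟩)
        · have hieq : i = m - 2 := by omega
          rw [hieq] at he; exact Or.inl he.symm
    split_ifs with hc
    · constructor
      · intro _
        rcases (hseen' _).mp hc with ⟨i, hi, he⟩
        exact ⟨m, by omega, by omega, i, by omega, he⟩
      · intro _; rfl
    · rw [ihn ((m : Int) + 1) _ (by omega) (by omega) hseen']
      constructor
      · rintro ⟨j, h1', h2', i, h3, h4⟩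
        exact ⟨j, by omega, h2', i, h3, h4⟩
      · rintro ⟨j, h1', h2', i, h3, h4⟩
        rcases Nat.lt_or_ge m j with hmj | hmj
        · exact ⟨j, by omega, h2', i, h3, h4⟩
        · have hje : j = m := by omega
          exfalso; apply hc
          apply (hseen' _).mpr
          rw [hje] at h4
          exact ⟨i, by omega, h4⟩

lemma pvLoopA2_eq_any (l : List Char) (r : List Int) :
    pvLoopA2 l r = r.any (fun i => PySem.List.pyGet? l i == PySem.List.pyGet? l (i + 2)) := by
  induction r with
  | nil => rfl
  | cons i rest ih =>
    simp only [pvLoopA2, List.any_cons]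
    split <;> simp_all

lemma pvEmptySeen (l : List Char) :
    ∀ x, (PySem.Set.empty : PySem.Set (List Char)).contains x = true ↔
      ∃ i : Nat, (i : Int) + 2 < 2 ∧ pvPair l i = x := by
  intro x
  constructor
  · intro h; simp [pysem] at h
  · rintro ⟨i', hi', -⟩; omega

lemma pvRule1Eq (l : List Char) :
    pvLoopA1 l (PySem.List.pyRange 0 ((l.length : Int) - 3) 1)
      = pvLoopB1 l PySem.Set.empty (PySem.List.pyRange 2 ((l.length : Int) - 1) 1) := by
  rw [Bool.eq_iff_iff]
  rw [pvLoopA1_iff l _ _ 0 le_rfl rfl]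
  rw [pvLoopB1_iff l _ _ 2 PySem.Set.empty (by norm_num) rfl (pvEmptySeen l)]
  constructor
  · rintro ⟨i, hi1, hi2, j, hj1, hj2, hp⟩
    exact ⟨j, by omega, by omega, i, hj1, hp⟩
  · rintro ⟨j, h1, h2, i, h3, h4⟩
    exact ⟨i, by omega, by omega, j, h3, by omega, h4⟩

-- ===== VERDICT (by name: the statement is the Claim_ definition above) =====
theorem solver_2_py_spec : Claim_equal_solver_2_py := by
  unfold Claim_equal_solver_2_py
  intro s _
  unfold Spec_solver_2_py
  show solver_2_py s = solver_2_py_alt s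
  simp only [solver_2_py, solver_2_py_alt]
  rw [pvLoopA2_eq_any, pvRule1Eq]
  rcases Bool.eq_false_or_eq_true (pvLoopB1 s.toList PySem.Set.empty
      (PySem.List.pyRange 2 ((s.toList.length : Int) - 1) 1)) with h | h <;> rw [h] <;> rfl
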